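-- pv_equiv track=rewrite | github.com/TFG-AlphaZero/Implementacion-TFG | tfg/util.py | get_games_per_worker
-- ===== SOURCE A (Python) =====
-- def get_games_per_worker(games, max_workers):
--     """Calculates the number of games each processor should play.
--
--     Args:
--         games (int): Total number of games to be played.
--         max_workers (int): Number of processors that will play those games.
--
--     Returns:
--          list[int]: Number of games each processor should play. The list
--             contains one element per processor.
--
--     """
--     d_games = games // max_workers
--     r_games = games % max_workers
--     n_games = [d_games] * max_workers
--     if r_games != 0:
--         for i in range(r_games):
--             n_games[i] += 1
--     return n_games
-- ===== SOURCE B (Python) =====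
-- def get_games_per_worker(games, max_workers):
--     n_games = []
--     g = games
--     m = max_workers
--     while m > 0:
--         q = -(-g // m)  # ceiling division: the largest fair share of the games left
--         n_games.append(q)
--         g -= q
--         m -= 1
--     return n_games
-- ===== Notes on version B (the rewrite author's own statement) =====
-- stated objective: alternative
-- what changed: Instead of computing divmod once, filling a list with the quotient and patching the first remainder entries, B runs a single peeling loop: each worker takes the ceiling of remaining_games/remaining_workers, which is subtracted before moving to the next worker.
import Mathlib
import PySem

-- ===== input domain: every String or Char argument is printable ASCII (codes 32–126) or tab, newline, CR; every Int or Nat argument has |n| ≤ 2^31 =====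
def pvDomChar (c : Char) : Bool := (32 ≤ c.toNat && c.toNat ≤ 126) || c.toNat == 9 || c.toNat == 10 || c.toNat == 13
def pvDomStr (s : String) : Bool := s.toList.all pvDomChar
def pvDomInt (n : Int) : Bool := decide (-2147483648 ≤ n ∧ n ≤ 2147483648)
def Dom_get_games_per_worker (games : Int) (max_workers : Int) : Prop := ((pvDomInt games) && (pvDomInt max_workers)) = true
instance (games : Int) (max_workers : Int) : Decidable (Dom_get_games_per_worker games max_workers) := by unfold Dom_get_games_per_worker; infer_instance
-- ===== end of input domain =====

-- B peels one worker at a time, giving each the ceiling of (remaining games / remaining workers), instead of A's divmod-fill-then-patch loop (objective: alternative).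


-- ===== PORT A =====
-- n_games[i] += 1 ported with pyGetD/pySetD: within the loop 0 ≤ i < r_games ≤ len(n_games), so the
-- defaulted read/write coincide with Python's (never raising) indexed access.
def get_games_per_worker (games : Int) (max_workers : Int) : List Int :=
  let d_games := PySem.Int.floordiv games max_workers
  let r_games := PySem.Int.mod games max_workers
  let n_games := PySem.List.pyRepeat [d_games] max_workers
  if r_games ≠ 0 then
    (PySem.List.pyRange 0 r_games 1).foldl
      (fun acc i => PySem.List.pySetD acc i (PySem.List.pyGetD acc i 0 + 1)) n_games
  else n_games

-- ===== PORT B =====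
-- B's while loop: each iteration appends the ceiling share -(-g // m) and recurses on (g - q, m - 1).
def pvAltLoop (g : Int) (m : Int) (acc : List Int) : List Int :=
  if h : 0 < m then
    let q := -(PySem.Int.floordiv (-g) m)
    pvAltLoop (g - q) (m - 1) (acc ++ [q])
  else acc
termination_by m.toNat
decreasing_by omega

def get_games_per_worker_alt (games : Int) (max_workers : Int) : List Int :=
  pvAltLoop games max_workers []

-- ===== PRECONDITION & SPEC =====
-- Pre_ excludes only max_workers = 0, where Python A raises ZeroDivisionError.
def Pre_get_games_per_worker (games : Int) (max_workers : Int) : Prop := max_workers ≠ 0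
instance (games : Int) (max_workers : Int) : Decidable (Pre_get_games_per_worker games max_workers) := by unfold Pre_get_games_per_worker; infer_instance
def pvWitness_get_games_per_worker : Int × Int := (7, 3)

def Spec_get_games_per_worker (games : Int) (max_workers : Int) (out : List Int) : Prop := out = get_games_per_worker_alt games max_workers
instance (games : Int) (max_workers : Int) (out : List Int) : Decidable (Spec_get_games_per_worker games max_workers out) := by unfold Spec_get_games_per_worker; infer_instance

-- ===== CLAIM (what is proved, stated in full; the proofs are below) =====
def Claim_equal_get_games_per_worker : Prop := ∀ (games : Int) (max_workers : Int), Dom_get_games_per_worker games max_workers → Pre_get_games_per_worker games max_workers → Spec_get_games_per_worker games max_workers (get_games_per_worker games max_workers)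

-- ===== LEMMAS AND PROOFS =====

-- A's increment loop on replicate n d equals the two constant blocks.
lemma fill_loop (k n : Nat) (d : Int) (h : k ≤ n) :
    (PySem.List.pyRange 0 (k : Int) 1).foldl
      (fun acc i => PySem.List.pySetD acc i (PySem.List.pyGetD acc i 0 + 1)) (List.replicate n d)
    = List.replicate k (d + 1) ++ List.replicate (n - k) d := by
  induction k with
  | zero => simp [PySem.List.pyRange_one_eq_nil]
  | succ k ih =>
    have hk : k ≤ n := Nat.le_of_succ_le h
    have hsplit : PySem.List.pyRange 0 ((k + 1 : Nat) : Int) 1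
        = PySem.List.pyRange 0 (k : Int) 1 ++ [(k : Int)] := by
      push_cast
      exact PySem.List.pyRange_one_succ_right (Int.natCast_nonneg k)
    rw [hsplit, List.foldl_append, ih hk]
    simp only [List.foldl_cons, List.foldl_nil]
    have hget : PySem.List.pyGetD (List.replicate k (d + 1) ++ List.replicate (n - k) d) (k : Int) 0 = d := by
      rw [PySem.List.pyGetD_natCast]
      have : k < (List.replicate k (d + 1) ++ List.replicate (n - k) d).length := by
        simp; omega
      rw [List.getD_eq_getElem _ _ this, List.getElem_append_right (by simp)]
      simp
    rw [hget, PySem.List.pySetD_natCast]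
    rw [List.set_append]
    simp only [List.length_replicate, lt_irrefl, Nat.sub_self]
    have hrep : List.replicate (n - k) d = d :: List.replicate (n - (k + 1)) d := by
      have : n - k = (n - (k + 1)) + 1 := by omega
      rw [this, List.replicate_succ]
    rw [hrep]
    simp [List.replicate_succ' (n := k)]

-- A's result for a positive worker count: r entries of d+1 then m-r entries of d.
lemma A_char (g m : Int) (hm : 0 < m) :
    get_games_per_worker g m
    = List.replicate (PySem.Int.mod g m).toNat (PySem.Int.floordiv g m + 1)
      ++ List.replicate ((m - PySem.Int.mod g m)).toNat (PySem.Int.floordiv g m) := by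
  unfold get_games_per_worker
  set d := PySem.Int.floordiv g m with hd
  set r := PySem.Int.mod g m with hr
  have hr1 : 0 ≤ r := hr ▸ PySem.Int.mod_nonneg (a := g) hm
  have hr2 : r < m := hr ▸ PySem.Int.mod_lt (a := g) hm
  by_cases h0 : r = 0
  · simp [h0, PySem.List.pyRepeat_singleton]
  · rw [if_pos h0, PySem.List.pyRepeat_singleton]
    conv_lhs => rw [show (r : Int) = ((r.toNat : Nat) : Int) from by omega]
    rw [fill_loop r.toNat m.toNat d (by omega),
        show m.toNat - r.toNat = (m - r).toNat from by omega]

-- B's loop produces the same two blocks, for any decomposition g = d*m + r with 0 ≤ r < m.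
lemma altLoop_char (k : Nat) : ∀ (g m d r : Int) (acc : List Int), 0 < m → m.toNat = k →
    g = d * m + r → 0 ≤ r → r < m →
    pvAltLoop g m acc
      = acc ++ (List.replicate r.toNat (d + 1) ++ List.replicate (m - r).toNat d) := by
  induction k with
  | zero => intro g m d r acc hm hk _ _ _; omega
  | succ k ih =>
    intro g m d r acc hm hk hg hr1 hr2
    rw [pvAltLoop, dif_pos hm]
    have hq : -(PySem.Int.floordiv (-g) m) = (if r = 0 then d else d + 1) := by
      rw [PySem.Int.neg_floordiv_neg_eq_iff_of_pos hm]
      by_cases h0 : r = 0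
      · rw [if_pos h0]
        constructor <;> nlinarith
      · rw [if_neg h0]
        have hr0 : 0 < r := by omega
        constructor <;> nlinarith
    rw [hq]
    by_cases h0 : r = 0
    · rw [if_pos h0]
      by_cases h1 : m = 1
      · subst h1
        rw [pvAltLoop, dif_neg (by omega)]
        simp [h0]
      · rw [ih (g - d) (m - 1) d 0 (acc ++ [d]) (by omega) (by omega) (by nlinarith [hg, h0]) le_rfl (by omega)]
        simp [h0]
        conv_rhs => rw [show m.toNat = (m.toNat - 1) + 1 from by omega, List.replicate_succ]
    · rw [if_neg h0]
      have hm2 : 1 < m := by omega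
      rw [ih (g - (d + 1)) (m - 1) d (r - 1) (acc ++ [d + 1]) (by omega) (by omega) (by nlinarith) (by omega) (by omega)]
      have h1 : r.toNat = (r - 1).toNat + 1 := by omega
      have h2 : (m - r).toNat = ((m - 1) - (r - 1)).toNat := by omega
      rw [h1, h2, List.replicate_succ]
      simp

theorem get_games_per_worker_spec : Claim_equal_get_games_per_worker := by
  intro g m _ hpre
  unfold Spec_get_games_per_worker get_games_per_worker_alt
  rcases lt_or_gt_of_ne hpre with hneg | hpos
  · -- negative worker count: both sides are []
    rw [pvAltLoop, dif_neg (by omega)]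
    unfold get_games_per_worker
    set r := PySem.Int.mod g m with hr
    obtain ⟨hr1, hr2⟩ := PySem.Int.mod_neg_bounds (a := g) hneg
    rw [← hr] at hr1 hr2
    by_cases h0 : r = 0
    · simp [h0, PySem.List.pyRepeat_singleton, Int.toNat_of_nonpos (le_of_lt hneg)]
    · rw [if_pos h0, PySem.List.pyRange_one_eq_nil (by omega : r ≤ 0)]
      simp [PySem.List.pyRepeat_singleton, Int.toNat_of_nonpos (le_of_lt hneg)]
  · -- positive worker count: both equal the two constant blocks
    have hd := PySem.Int.floordiv_mul_add_mod g m
    rw [A_char g m hpos,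
        altLoop_char m.toNat g m (PySem.Int.floordiv g m) (PySem.Int.mod g m) [] hpos rfl
          (by linarith) (PySem.Int.mod_nonneg (a := g) hpos) (PySem.Int.mod_lt (a := g) hpos)]
    simp

-- ===== VERDICT (by name: the statement is the Claim_ definition above) =====
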